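-- pv_equiv track=rewrite | github.com/rkdtndk99/PS_study_smwu | Week3/rkdtndk99/모의고사.py | solution
-- ===== SOURCE A (Python) =====
-- def solution(answers):
--     students = [
--         [1, 2, 3, 4, 5],
--         [2, 1, 2, 3, 2, 4, 2, 5],
--         [3, 3, 1, 1, 2, 2, 4, 4, 5, 5]
--     ]
--     answer = [0, 0, 0]
--     result = []
--
--     for i in range(len(answers)):
--         if answers[i] == students[0][i % 5]:
--             answer[0] += 1
--         if answers[i] == students[1][i % 8]:
--             answer[1] += 1
--         if answers[i] == students[2][i % 10]:
--             answer[2] += 1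
--
--     m = max(answer)
--     for i in range(len(answer)):
--         if m <= answer[i]:
--             result.append(i + 1)
--
--     return result
-- ===== SOURCE B (Python) =====
-- def solution(answers):
--     patterns = [
--         [1, 2, 3, 4, 5],
--         [2, 1, 2, 3, 2, 4, 2, 5],
--         [3, 3, 1, 1, 2, 2, 4, 4, 5, 5],
--     ]
--     scores = []
--     for pat in patterns:
--         rem = []
--         hits = 0
--         for a in answers:
--             if not rem:
--                 rem = pat
--             if a == rem[0]:
--                 hits += 1
--             rem = rem[1:]
--         scores.append(hits)
--     m = max(scores)
--     return [i + 1 for i, s in enumerate(scores) if s == m]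
-- ===== Notes on version B (the rewrite author's own statement) =====
-- stated objective: alternative
-- what changed: Replaced A's single pass that indexes all three patterns via i%5/i%8/i%10 into a shared 3-slot accumulator with per-pattern passes that carry a rotating working copy of the pattern (refill when empty, compare against its head, drop it) with no index arithmetic at all, then filter scores by equality with max instead of A's 'm <= answer[i]' threshold scan.
import Mathlib
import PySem

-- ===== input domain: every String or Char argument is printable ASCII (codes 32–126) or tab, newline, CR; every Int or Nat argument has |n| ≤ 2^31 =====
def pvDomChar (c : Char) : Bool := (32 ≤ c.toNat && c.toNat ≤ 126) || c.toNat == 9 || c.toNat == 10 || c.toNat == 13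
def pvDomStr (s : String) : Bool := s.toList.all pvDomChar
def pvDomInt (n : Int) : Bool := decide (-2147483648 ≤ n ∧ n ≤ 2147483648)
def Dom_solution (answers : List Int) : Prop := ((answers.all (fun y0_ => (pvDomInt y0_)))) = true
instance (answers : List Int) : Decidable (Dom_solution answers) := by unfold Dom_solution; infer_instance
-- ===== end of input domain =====

-- B replaces A's single modulo-indexed pass over a shared 3-slot accumulator by per-pattern
-- passes that rotate a working copy of the pattern (refill when empty, compare with its head,
-- drop it) — no index arithmetic — then filters scores by equality with max (objective: alternative).

-- ===== PORT A =====
def solution (answers : List Int) : List Int :=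
  let s0 : List Int := [1, 2, 3, 4, 5]
  let s1 : List Int := [2, 1, 2, 3, 2, 4, 2, 5]
  let s2 : List Int := [3, 3, 1, 1, 2, 2, 4, 4, 5, 5]
  let answer :=
    (PySem.List.pyRange 0 (answers.length : Int) 1).foldl
      (fun (a : Int × Int × Int) i =>
        let x := PySem.List.pyGetD answers i 0
        let a0 := if x = PySem.List.pyGetD s0 (PySem.Int.mod i 5) 0 then a.1 + 1 else a.1
        let a1 := if x = PySem.List.pyGetD s1 (PySem.Int.mod i 8) 0 then a.2.1 + 1 else a.2.1
        let a2 := if x = PySem.List.pyGetD s2 (PySem.Int.mod i 10) 0 then a.2.2 + 1 else a.2.2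
        (a0, a1, a2)) (0, 0, 0)
  let answerL : List Int := [answer.1, answer.2.1, answer.2.2]
  let m := (PySem.List.max? answerL (fun x => x)).getD 0
  (PySem.List.pyRange 0 (answerL.length : Int) 1).foldl
    (fun (r : List Int) i => if m ≤ PySem.List.pyGetD answerL i 0 then r ++ [i + 1] else r) []

-- ===== PORT B =====
-- inner loop of Source B: rotate a working copy 'rem' of the pattern over the answers
-- (rem[0] is ported as pyGetD rem 0 0; rem is never empty there since the patterns are nonempty)
def rotScore (pat : List Int) (answers : List Int) : Int :=
  (answers.foldl
    (fun (st : List Int × Int) a =>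
      let rem := if st.1 = [] then pat else st.1
      let hits := if a = PySem.List.pyGetD rem 0 0 then st.2 + 1 else st.2
      (PySem.List.slice rem (some 1) none, hits))   -- rem = rem[1:]
    ([], 0)).2

def solution_alt (answers : List Int) : List Int :=
  let patterns : List (List Int) :=
    [[1, 2, 3, 4, 5], [2, 1, 2, 3, 2, 4, 2, 5], [3, 3, 1, 1, 2, 2, 4, 4, 5, 5]]
  let scores := patterns.foldl (fun (acc : List Int) pat => acc ++ [rotScore pat answers]) []
  let m := (PySem.List.max? scores (fun x => x)).getD 0
  (PySem.List.enumerate scores 0).foldl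
    (fun (r : List Int) p => if p.2 = m then r ++ [p.1 + 1] else r) []

-- ===== PRECONDITION & SPEC =====
def Spec_solution (answers : List Int) (out : List Int) : Prop := out = solution_alt answers
instance (answers : List Int) (out : List Int) : Decidable (Spec_solution answers out) := by unfold Spec_solution; infer_instance

-- ===== CLAIM (what is proved, stated in full; the proofs are below) =====
def Claim_equal_solution : Prop := ∀ (answers : List Int), Dom_solution answers → Spec_solution answers (solution answers)

-- ===== LEMMAS AND PROOFS =====

-- common counting function both sides are reduced to: cnt pat j xs counts the x in xs whose
-- running index (starting at j) hits the pattern value at position (index mod pattern length)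
def cnt (pat : List Int) : Nat → List Int → Int
  | _, [] => 0
  | j, a :: rest =>
      (if a = PySem.List.pyGetD pat ((j % pat.length : Nat) : Int) 0 then 1 else 0) +
        cnt pat (j + 1) rest

-- the step of B's rotating fold, named (equal to the lambda in rotScore)
def rotStep (pat : List Int) (st : List Int × Int) (a : Int) : List Int × Int :=
  let rem := if st.1 = [] then pat else st.1
  (rem.tail, if a = PySem.List.pyGetD rem 0 0 then st.2 + 1 else st.2)

lemma rotStep_eq (pat : List Int) :
    (fun (st : List Int × Int) a =>
      let rem := if st.1 = [] then pat else st.1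
      let hits := if a = PySem.List.pyGetD rem 0 0 then st.2 + 1 else st.2
      (PySem.List.slice rem (some 1) none, hits)) = rotStep pat := by
  funext st a
  simp [rotStep, PySem.List.slice_from_one]

lemma cnt_add_len (pat : List Int) :
    ∀ (xs : List Int) (j : Nat), cnt pat (j + pat.length) xs = cnt pat j xs := by
  intro xs
  induction xs with
  | nil => intro j; rfl
  | cons a rest ih =>
    intro j
    simp only [cnt, Nat.add_mod_right]
    rw [show j + pat.length + 1 = (j + 1) + pat.length by ring, ih]

-- B's rotating fold with state (pat.drop k, s), k ≤ |pat|, computes s + cnt pat k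
lemma rot_fold_eq_cnt (pat : List Int) (hp : pat ≠ []) :
    ∀ (xs : List Int) (k : Nat) (s : Int) (r : List Int), k ≤ pat.length → r = pat.drop k →
      (xs.foldl (rotStep pat) (r, s)).2 = s + cnt pat k xs := by
  intro xs
  induction xs with
  | nil => intro k s r hk hr; simp [cnt]
  | cons a rest ih =>
    intro k s r hk hr
    subst hr
    by_cases hkL : k = pat.length
    · subst hkL
      have hstep : rotStep pat (pat.drop pat.length, s) a =
          (pat.drop 1, if a = PySem.List.pyGetD pat 0 0 then s + 1 else s) := by
        simp [rotStep, List.drop_length, ← List.drop_one]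
      rw [List.foldl_cons, hstep,
        ih 1 _ _ (by have := List.length_pos_of_ne_nil hp; omega) rfl]
      have h2 : cnt pat pat.length (a :: rest) =
          (if a = PySem.List.pyGetD pat ((pat.length % pat.length : Nat) : Int) 0 then 1 else 0) +
            cnt pat (pat.length + 1) rest := rfl
      rw [h2, Nat.mod_self, show pat.length + 1 = 1 + pat.length by ring, cnt_add_len]
      simp only [Nat.cast_zero]
      split_ifs <;> ring
    · have hklt : k < pat.length := lt_of_le_of_ne hk hkL
      have hne : pat.drop k ≠ [] := by
        simp only [ne_eq, List.drop_eq_nil_iff]; omega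
      have hhead : PySem.List.pyGetD (pat.drop k) 0 0 = pat[k] := by
        rw [PySem.List.pyGetD_eq_getElem _ _ le_rfl (by simp; omega)]
        simp
      have hstep : rotStep pat (pat.drop k, s) a =
          (pat.drop (k + 1), if a = pat[k] then s + 1 else s) := by
        simp only [rotStep, if_neg hne, hhead, ← List.drop_one, List.drop_drop]
      rw [List.foldl_cons, hstep, ih (k + 1) _ _ (by omega) rfl]
      have hcnt : cnt pat k (a :: rest) =
          (if a = PySem.List.pyGetD pat ((k % pat.length : Nat) : Int) 0 then 1 else 0) +
            cnt pat (k + 1) rest := rfl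
      have hidx : PySem.List.pyGetD pat ((k % pat.length : Nat) : Int) 0 = pat[k] := by
        rw [Nat.mod_eq_of_lt hklt,
          PySem.List.pyGetD_eq_getElem _ _ (by positivity) (by exact_mod_cast hklt)]
        simp
      rw [hcnt, hidx]
      split_ifs <;> ring

lemma rotScore_eq_cnt (pat : List Int) (hp : pat ≠ []) (answers : List Int) :
    rotScore pat answers = cnt pat 0 answers := by
  unfold rotScore
  rw [rotStep_eq pat,
    rot_fold_eq_cnt pat hp answers pat.length 0 []
      le_rfl (List.drop_length).symm,
    show pat.length = 0 + pat.length by ring, cnt_add_len]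
  ring

-- A's per-student count over enumerate equals cnt
lemma enum_fold_eq_cnt (pat : List Int) :
    ∀ (xs : List Int) (j : Nat) (s : Int),
      (PySem.List.enumerate xs (j : Int)).foldl
        (fun (acc : Int) p =>
          if p.2 = PySem.List.pyGetD pat (PySem.Int.mod p.1 (pat.length : Int)) 0
          then acc + 1 else acc) s = s + cnt pat j xs := by
  intro xs
  induction xs with
  | nil => intro j s; simp [PySem.List.enumerate_nil, cnt]
  | cons a rest ih =>
    intro j s
    rw [PySem.List.enumerate_cons, List.foldl_cons,
      show (j : Int) + 1 = ((j + 1 : Nat) : Int) by push_cast; ring, ih]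
    have hmod : PySem.Int.mod (j : Int) (pat.length : Int) = ((j % pat.length : Nat) : Int) :=
      PySem.Int.mod_natCast j pat.length
    have hcnt : cnt pat j (a :: rest) =
        (if a = PySem.List.pyGetD pat ((j % pat.length : Nat) : Int) 0 then 1 else 0) +
          cnt pat (j + 1) rest := rfl
    rw [hcnt, hmod]
    split_ifs <;> ring

-- A's combined loop computes the three independent pattern counts
lemma loopA_eq_cnt (answers : List Int) :
    (PySem.List.pyRange 0 (answers.length : Int) 1).foldl
      (fun (a : Int × Int × Int) i =>
        let x := PySem.List.pyGetD answers i 0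
        let a0 := if x = PySem.List.pyGetD [1, 2, 3, 4, 5] (PySem.Int.mod i 5) 0 then a.1 + 1 else a.1
        let a1 := if x = PySem.List.pyGetD [2, 1, 2, 3, 2, 4, 2, 5] (PySem.Int.mod i 8) 0 then a.2.1 + 1 else a.2.1
        let a2 := if x = PySem.List.pyGetD [3, 3, 1, 1, 2, 2, 4, 4, 5, 5] (PySem.Int.mod i 10) 0 then a.2.2 + 1 else a.2.2
        (a0, a1, a2)) (0, 0, 0)
    = (cnt [1, 2, 3, 4, 5] 0 answers,
       cnt [2, 1, 2, 3, 2, 4, 2, 5] 0 answers,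
       cnt [3, 3, 1, 1, 2, 2, 4, 4, 5, 5] 0 answers) := by
  have he := PySem.List.enumerate_eq_map_pyRange (d := (0 : Int)) (xs := answers)
  have h0 := enum_fold_eq_cnt [1, 2, 3, 4, 5] answers 0 0
  have h1 := enum_fold_eq_cnt [2, 1, 2, 3, 2, 4, 2, 5] answers 0 0
  have h2 := enum_fold_eq_cnt [3, 3, 1, 1, 2, 2, 4, 4, 5, 5] answers 0 0
  simp only [Nat.cast_zero] at h0 h1 h2
  rw [he, List.foldl_map] at h0 h1 h2
  norm_num at h0 h1 h2 ⊢
  rw [← h0, ← h1, ← h2]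
  rw [← PySem.List.foldl_prod_mk
        (fun (acc : Int) (i : Int) => if PySem.List.pyGetD answers i 0 = PySem.List.pyGetD [2, 1, 2, 3, 2, 4, 2, 5] (i % 8) 0 then acc + 1 else acc)
        (fun (acc : Int) (i : Int) => if PySem.List.pyGetD answers i 0 = PySem.List.pyGetD [3, 3, 1, 1, 2, 2, 4, 4, 5, 5] (i % 10) 0 then acc + 1 else acc)]
  rw [← PySem.List.foldl_prod_mk]

-- the two final scans agree: 'm <= answer[i]' over the index range is the
-- equality-with-max filter over enumerate(scores)
lemma final_eq (c0 c1 c2 : Int) :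
    (PySem.List.pyRange 0 ((([c0, c1, c2] : List Int).length : Int)) 1).foldl
      (fun (r : List Int) i =>
        if (PySem.List.max? [c0, c1, c2] (fun x => x)).getD 0 ≤ PySem.List.pyGetD [c0, c1, c2] i 0
        then r ++ [i + 1] else r) []
    = (PySem.List.enumerate [c0, c1, c2] 0).foldl
        (fun (r : List Int) p =>
          if p.2 = (PySem.List.max? [c0, c1, c2] (fun x => x)).getD 0
          then r ++ [p.1 + 1] else r) [] := by
  have hm : (PySem.List.max? [c0, c1, c2] (fun x => x)).getD 0 = max c0 (max c1 c2) := by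
    rw [PySem.List.max?_id_cons]
    simp [max_assoc]
  rw [hm]
  rw [show ((([c0, c1, c2] : List Int).length : Int)) = 3 by norm_num]
  rw [show PySem.List.pyRange 0 3 1 = [0, 1, 2] by decide]
  simp only [PySem.List.enumerate, List.foldl_cons, List.foldl_nil,
    show PySem.List.pyGetD [c0, c1, c2] 0 0 = c0 from rfl,
    show PySem.List.pyGetD [c0, c1, c2] 1 0 = c1 from rfl,
    show PySem.List.pyGetD [c0, c1, c2] 2 0 = c2 from rfl]
  split_ifs <;> first | rfl | (exfalso; omega)

-- ===== VERDICT (by name: the statement is the Claim_ definition above) =====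
theorem solution_spec : Claim_equal_solution := by
  intro answers _
  unfold Spec_solution solution solution_alt
  simp only [List.foldl_cons, List.foldl_nil, List.nil_append, List.singleton_append]
  rw [loopA_eq_cnt]
  simp only [rotScore_eq_cnt [1, 2, 3, 4, 5] (by simp),
    rotScore_eq_cnt [2, 1, 2, 3, 2, 4, 2, 5] (by simp),
    rotScore_eq_cnt [3, 3, 1, 1, 2, 2, 4, 4, 5, 5] (by simp)]
  exact final_eq _ _ _
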